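-- pv_equiv track=rewrite | github.com/Equilibris/heggen-vgs | foobar/xor.py | solution
-- ===== SOURCE A (Python) =====
-- def xor_to(x):
--     result = [x, 1, x+1, 0]
--     return result[(x) % 4]
--
-- def xor_between(a, b):
--     # xor is associative
--     # n ^ n == 0
--     # EXAMPLE if 2 ^ 3 ^ 4 is desired
--     #   0 ^ 1 ^ 2 ^ 3 ^ 4
--     # ^ 0 ^ 1
--     # == (0 ^ 0) ^ (1 ^ 1) ^ 2 ^ 3 ^ 4
--     # ==                     2 ^ 3 ^ 4
--     return xor_to(a) ^ xor_to(b)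
--
-- def solution(start, length):
--     v = 0
--     n = start
--     l = length
--     for i in range(length):
--         v ^= xor_between(n-1, n+l-1)
--
--         n += length
--         l -= 1
--
--     return v
-- ===== SOURCE B (Python) =====
-- def xor_range(a, b):
--     # XOR of all integers from a to b inclusive, by pair cancellation:
--     # (2k) ^ (2k+1) == 1, so after peeling an odd leading element and an
--     # even trailing element the rest is whole (even, odd) pairs and
--     # contributes just the parity of the number of pairs.
--     v = 0
--     if a % 2 == 1:
--         v ^= a
--         a += 1
--     if b % 2 == 0:
--         v ^= b
--         b -= 1
--     if a < b:
--         v ^= ((b - a + 1) // 2) % 2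
--     return v
--
--
-- def solution(start, length):
--     v = 0
--     for i in range(length):
--         a = start + i * length
--         b = a + (length - i) - 1
--         v ^= xor_range(a, b)
--     return v
-- ===== Notes on version B (the rewrite author's own statement) =====
-- stated objective: alternative
-- what changed: Replaced A's mod-4 prefix-XOR lookup helpers (xor_to/xor_between) and threaded n/l loop state with a direct per-row range-XOR computed by pair cancellation ((2k)^(2k+1)=1): peel an odd leading / even trailing element, then add the parity of the remaining pair count.
import Mathlib
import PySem

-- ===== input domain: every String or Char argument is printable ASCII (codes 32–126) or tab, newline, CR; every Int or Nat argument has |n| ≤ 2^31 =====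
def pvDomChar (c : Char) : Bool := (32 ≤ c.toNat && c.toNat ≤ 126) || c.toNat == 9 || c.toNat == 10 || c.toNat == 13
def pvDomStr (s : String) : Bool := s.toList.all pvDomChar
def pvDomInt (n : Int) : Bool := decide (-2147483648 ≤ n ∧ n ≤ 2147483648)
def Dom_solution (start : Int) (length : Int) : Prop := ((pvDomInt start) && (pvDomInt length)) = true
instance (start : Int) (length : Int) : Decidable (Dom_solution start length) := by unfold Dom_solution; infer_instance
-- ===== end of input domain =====

-- B replaces A's mod-4 prefix-XOR lookup helpers and threaded n/l loop state with a
-- direct per-row range XOR computed by pair cancellation ((2k)^(2k+1) = 1).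


-- ===== PORT A =====
def xor_to (x : Int) : Int :=
  let result : List Int := [x, 1, x + 1, 0]
  -- result[x % 4]: the index is always in 0..3, so pyGet? never returns none
  (PySem.List.pyGet? result (PySem.Int.mod x 4)).getD 0

def xor_between (a : Int) (b : Int) : Int :=
  PySem.Int.bxor (xor_to a) (xor_to b)

def solution (start : Int) (length : Int) : Int :=
  -- for i in range(length): v ^= xor_between(n-1, n+l-1); n += length; l -= 1
  ((PySem.List.pyRange 0 length 1).foldl
    (fun (st : Int × Int × Int) _i =>
      (PySem.Int.bxor st.1 (xor_between (st.2.1 - 1) (st.2.1 + st.2.2 - 1)),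
       st.2.1 + length, st.2.2 - 1))
    (0, start, length)).1

-- ===== PORT B =====
-- each mutating 'if' of Source B's xor_range becomes a pair of same-condition lets
def xor_range (a : Int) (b : Int) : Int :=
  let v : Int := 0
  let v := if PySem.Int.mod a 2 = 1 then PySem.Int.bxor v a else v
  let a := if PySem.Int.mod a 2 = 1 then a + 1 else a
  let v := if PySem.Int.mod b 2 = 0 then PySem.Int.bxor v b else v
  let b := if PySem.Int.mod b 2 = 0 then b - 1 else b
  if a < b then PySem.Int.bxor v (PySem.Int.mod (PySem.Int.floordiv (b - a + 1) 2) 2) else v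

def solution_alt (start : Int) (length : Int) : Int :=
  (PySem.List.pyRange 0 length 1).foldl
    (fun v i =>
      let a := start + i * length
      let b := a + (length - i) - 1
      PySem.Int.bxor v (xor_range a b))
    0

-- ===== PRECONDITION & SPEC =====
def Spec_solution (start : Int) (length : Int) (out : Int) : Prop := out = solution_alt start length
instance (start : Int) (length : Int) (out : Int) : Decidable (Spec_solution start length out) := by unfold Spec_solution; infer_instance

-- ===== CLAIM (what is proved, stated in full; the proofs are below) =====
def Claim_equal_solution : Prop := ∀ (start : Int) (length : Int), Dom_solution start length → Spec_solution start length (solution start length)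

-- ===== LEMMAS AND PROOFS =====

theorem bxor_eq_xor (a b : Int) : PySem.Int.bxor a b = Int.xor a b := by
  unfold PySem.Int.bxor
  cases a with
  | ofNat m => cases b with
    | ofNat n => simp [Int.xor]
    | negSucc n => simp [Int.xor, Int.negSucc_eq]; ring_nf; omega
  | negSucc m => cases b with
    | ofNat n => simp [Int.xor, Int.negSucc_eq]; ring_nf; omega
    | negSucc n => simp [Int.xor, Int.negSucc_eq]; ring_nf; omega

theorem ixor_assoc (a b c : Int) : Int.xor (Int.xor a b) c = Int.xor a (Int.xor b c) := by
  cases a <;> cases b <;> cases c <;> simp [Int.xor, Nat.xor_assoc]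

theorem ixor_comm (a b : Int) : Int.xor a b = Int.xor b a := by
  cases a <;> cases b <;> simp [Int.xor, Nat.xor_comm]

theorem ixor_self (a : Int) : Int.xor a a = 0 := by
  cases a <;> simp [Int.xor]

theorem ixor_zero (a : Int) : Int.xor a 0 = a := by
  cases a <;> simp [Int.xor]

theorem zero_ixor (a : Int) : Int.xor 0 a = a := by
  cases a <;> simp [Int.xor]

theorem ixor_right_comm (x y z : Int) : Int.xor (Int.xor x y) z = Int.xor (Int.xor x z) y := by
  rw [ixor_assoc, ixor_comm y z, ← ixor_assoc]

theorem xor_two_mul_one (k : Int) : Int.xor (2*k) 1 = 2*k + 1 := by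
  have h1 : (2*k : Int) = Int.bit false k := by simp [Int.bit]
  have h2 : (1 : Int) = Int.bit true 0 := by simp [Int.bit]
  rw [h1, h2, Int.lxor_bit]
  simp [Int.bit, ixor_zero]

theorem pair_xor (k : Int) : Int.xor (2*k) (2*k+1) = 1 := by
  rw [← xor_two_mul_one k, ← ixor_assoc, ixor_self, zero_ixor]

theorem pymod4 (x : Int) : PySem.Int.mod x 4 = x % 4 := by
  unfold PySem.Int.mod; rw [Int.fmod_eq_emod]; omega

theorem pymod2 (x : Int) : PySem.Int.mod x 2 = x % 2 := by
  unfold PySem.Int.mod; rw [Int.fmod_eq_emod]; omega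

theorem pydiv2 (x : Int) : PySem.Int.floordiv x 2 = x / 2 := by
  unfold PySem.Int.floordiv; rw [Int.fdiv_eq_ediv]; omega

theorem xor_to_eq (x : Int) : xor_to x =
    if x % 4 = 0 then x else if x % 4 = 1 then 1 else if x % 4 = 2 then x + 1 else 0 := by
  unfold xor_to
  rw [pymod4]
  have h4 : x % 4 = 0 ∨ x % 4 = 1 ∨ x % 4 = 2 ∨ x % 4 = 3 := by omega
  rcases h4 with h | h | h | h <;> rw [h] <;>
    simp [PySem.List.pyGet?, PySem.List.pyIdx?]

-- xor_to satisfies the prefix-XOR recurrence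
theorem xor_to_succ (x : Int) : xor_to x = Int.xor (xor_to (x - 1)) x := by
  have h4 : x % 4 = 0 ∨ x % 4 = 1 ∨ x % 4 = 2 ∨ x % 4 = 3 := by omega
  rcases h4 with h | h | h | h
  · have h' : (x - 1) % 4 = 3 := by omega
    rw [xor_to_eq, xor_to_eq, h, h']
    norm_num
    exact (zero_ixor x).symm
  · have h' : (x - 1) % 4 = 0 := by omega
    rw [xor_to_eq, xor_to_eq, h, h']
    norm_num
    obtain ⟨k, hk⟩ : ∃ k, x = 2*k + 1 := ⟨x / 2, by omega⟩
    subst hk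
    rw [show (2*k + 1 - 1 : Int) = 2*k by ring, ← xor_two_mul_one k, ← ixor_assoc,
        ixor_self, zero_ixor]
  · have h' : (x - 1) % 4 = 1 := by omega
    rw [xor_to_eq, xor_to_eq, h, h']
    norm_num
    obtain ⟨k, hk⟩ : ∃ k, x = 2*k := ⟨x / 2, by omega⟩
    subst hk
    rw [ixor_comm, xor_two_mul_one]
  · have h' : (x - 1) % 4 = 2 := by omega
    rw [xor_to_eq, xor_to_eq, h, h']
    norm_num
    rw [ixor_self]

theorem xor_range_base (a : Int) : xor_range a a = a := by
  unfold xor_range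
  simp only [pymod2, pydiv2, bxor_eq_xor]
  rcases (by omega : a % 2 = 0 ∨ a % 2 = 1) with h | h <;>
    simp [h, zero_ixor]

-- xor_range satisfies the same recurrence in its upper end
theorem xor_range_succ (a b : Int) (h : a ≤ b - 1) :
    xor_range a b = Int.xor (xor_range a (b - 1)) b := by
  unfold xor_range
  simp only [pymod2, pydiv2, bxor_eq_xor]
  rcases (by omega : a % 2 = 0 ∨ a % 2 = 1) with ha | ha <;>
  rcases (by omega : b % 2 = 0 ∨ b % 2 = 1) with hb | hb <;>
    have hb' : (b - 1) % 2 = 1 - b % 2 := by omega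
  all_goals (rw [hb] at hb'; norm_num at hb')
  all_goals simp only [ha, hb, hb']
  all_goals norm_num
  all_goals (try split_ifs <;> try omega)
  all_goals simp only [zero_ixor]
  -- (a even, b even, a < b-1): pure commutativity
  · rw [ixor_comm]
  -- (a even, b odd, a < b-2): pair count drops by one, (b-1)^b = 1
  · obtain ⟨k, hk⟩ : ∃ k, b = 2*k + 1 := ⟨b / 2, by omega⟩
    rw [show (b - 1 - 1 - a + 1 : Int) = b - a - 1 by ring]
    rcases (by omega : (b - a - 1)/2 % 2 = 0 ∨ (b - a - 1)/2 % 2 = 1) with hq | hq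
    · have h1 : (b - a + 1)/2 % 2 = 1 := by omega
      rw [h1, hq, ixor_zero, hk, show (2*k+1-1 : Int) = 2*k by ring, pair_xor]
    · have h1 : (b - a + 1)/2 % 2 = 0 := by omega
      rw [h1, hq, ixor_right_comm, hk, show (2*k+1-1 : Int) = 2*k by ring, pair_xor]
      decide
  -- (a even, b odd, a = b-1): single element b
  · have h1 : (b - a + 1)/2 % 2 = 1 := by omega
    rw [h1]
    obtain ⟨k, hk⟩ : ∃ k, b = 2*k + 1 := ⟨b / 2, by omega⟩
    rw [hk, show (2*k+1-1 : Int) = 2*k by ring, pair_xor]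
  -- (a odd, b even, a+1 < b-1): pure right-commutativity
  · rw [ixor_right_comm]
  -- (a odd, b odd, a+1 < b-2)
  · obtain ⟨k, hk⟩ : ∃ k, b = 2*k + 1 := ⟨b / 2, by omega⟩
    rw [show (b - 1 - 1 - (a+1) + 1 : Int) = b - a - 2 by ring,
        show (b - (a+1) + 1 : Int) = b - a by ring]
    rcases (by omega : (b - a - 2)/2 % 2 = 0 ∨ (b - a - 2)/2 % 2 = 1) with hq | hq
    · have h1 : (b - a)/2 % 2 = 1 := by omega
      rw [h1, hq, ixor_zero, ixor_assoc, hk, show (2*k+1-1 : Int) = 2*k by ring, pair_xor]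
    · have h1 : (b - a)/2 % 2 = 0 := by omega
      rw [h1, hq, ixor_zero, ixor_right_comm (Int.xor a (b-1)) 1 b, ixor_assoc a (b-1) b,
          hk, show (2*k+1-1 : Int) = 2*k by ring, pair_xor, ixor_assoc,
          show Int.xor 1 1 = 0 from by decide, ixor_zero]
  -- (a odd, b odd, a+1 = b-1): single element b
  · have h1 : (b - (a+1) + 1)/2 % 2 = 1 := by omega
    rw [h1, ixor_assoc]
    obtain ⟨k, hk⟩ : ∃ k, b = 2*k + 1 := ⟨b / 2, by omega⟩
    rw [hk, show (2*k+1-1 : Int) = 2*k by ring, pair_xor]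

-- B's pair-cancellation range XOR equals A's prefix-XOR difference
theorem xr_eq (k : Nat) : ∀ (a : Int),
    xor_range a (a + k) = Int.xor (xor_to (a - 1)) (xor_to (a + k)) := by
  induction k with
  | zero =>
    intro a
    simp only [Nat.cast_zero, add_zero]
    rw [xor_range_base, xor_to_succ a, ← ixor_assoc, ixor_self, zero_ixor]
  | succ k ih =>
    intro a
    have hc : (a + (k + 1 : Nat) : Int) = (a + k) + 1 := by push_cast; ring
    rw [hc, xor_range_succ a (a + k + 1) (by omega),
        show (a + k + 1 - 1 : Int) = a + k by ring, ih a,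
        xor_to_succ (a + k + 1), show (a + k + 1 - 1 : Int) = a + k by ring, ixor_assoc]

-- Outer loop invariant: after t of the len iterations, A's state is
-- (v, start + t*len, len - t); the remaining iterations of A and B agree.
theorem outer_fold (k : Nat) : ∀ (t len start v : Int), t + k = len →
    ((PySem.List.pyRange t len 1).foldl
      (fun (st : Int × Int × Int) _i =>
        (PySem.Int.bxor st.1 (xor_between (st.2.1 - 1) (st.2.1 + st.2.2 - 1)),
         st.2.1 + len, st.2.2 - 1))
      (v, start + t * len, len - t)).1
    = (PySem.List.pyRange t len 1).foldl
        (fun v i =>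
          PySem.Int.bxor v
            (xor_range (start + i * len) ((start + i * len) + (len - i) - 1)))
        v := by
  induction k with
  | zero =>
    intro t len start v ht
    rw [PySem.List.pyRange_one_eq_nil (by omega)]
    simp
  | succ k ih =>
    intro t len start v ht
    have hlt : t < len := by omega
    rw [PySem.List.pyRange_one_cons hlt]
    simp only [List.foldl_cons]
    have hcast : ((len - t - 1).toNat : Int) = len - t - 1 := by omega
    have hrow : xor_range (start + t * len) ((start + t * len) + (len - t) - 1)
        = xor_between (start + t * len - 1) (start + t * len + (len - t) - 1) := by
      have := xr_eq (len - t - 1).toNat (start + t * len)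
      rw [hcast] at this
      rw [show ((start + t * len) + (len - t) - 1 : Int)
            = (start + t * len) + (len - t - 1) by ring, this,
          xor_between, bxor_eq_xor,
          show (start + t * len + (len - t - 1) : Int)
            = start + t * len + (len - t) - 1 by ring]
    rw [hrow]
    have hn : (start + t * len + len : Int) = start + (t + 1) * len := by ring
    have hl : (len - t - 1 : Int) = len - (t + 1) := by ring
    rw [hn, hl]
    exact ih (t + 1) len start _ (by omega)

-- ===== VERDICT (by name: the statement is the Claim_ definition above) =====
theorem solution_spec : Claim_equal_solution := by
  unfold Claim_equal_solution Spec_solution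
  intro start len _
  unfold solution solution_alt
  by_cases h : len ≤ 0
  · rw [PySem.List.pyRange_one_eq_nil h]
    simp
  · have := outer_fold len.toNat 0 len start 0 (by omega)
    simpa using this
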